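-- pv_equiv track=rewrite | github.com/rexRUBY/CodeKata | 프로그래머스/2/138476. 귤 고르기/귤 고르기.py | solution
-- ===== SOURCE A (Python) =====
-- from collections import Counter
--
-- def solution(k, tangerine):
--     answer = 0
--     total = 0
--
--     frequency = Counter(tangerine)
--     frequent = sorted(frequency.values(), reverse=True)
--
--     for i in frequent:
--         total += i
--         answer += 1
--
--         if(total >= k):
--             break
--
--     return answer
-- ===== SOURCE B (Python) =====
-- from collections import Counter
--
-- def solution(k, tangerine):
--     frequency = Counter(tangerine)
--     if not frequency:
--         return 0
--     buckets = Counter(frequency.values())   # buckets[c] = number of distinct sizes occurring exactly c times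
--     max_count = max(frequency.values())
--     answer = 0
--     total = 0
--     for c in range(max_count, 0, -1):       # descending scan over possible counts: no sort needed
--         for _ in range(buckets[c]):
--             total += c
--             answer += 1
--             if total >= k:
--                 return answer
--     return answer
-- ===== Notes on version B (the rewrite author's own statement) =====
-- stated objective: alternative
-- what changed: Replaces sorting the Counter values in descending order by a bucket counter indexed by frequency that is scanned from the maximal count downwards, accumulating per size and returning early as soon as the running total reaches k.
import Mathlib
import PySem

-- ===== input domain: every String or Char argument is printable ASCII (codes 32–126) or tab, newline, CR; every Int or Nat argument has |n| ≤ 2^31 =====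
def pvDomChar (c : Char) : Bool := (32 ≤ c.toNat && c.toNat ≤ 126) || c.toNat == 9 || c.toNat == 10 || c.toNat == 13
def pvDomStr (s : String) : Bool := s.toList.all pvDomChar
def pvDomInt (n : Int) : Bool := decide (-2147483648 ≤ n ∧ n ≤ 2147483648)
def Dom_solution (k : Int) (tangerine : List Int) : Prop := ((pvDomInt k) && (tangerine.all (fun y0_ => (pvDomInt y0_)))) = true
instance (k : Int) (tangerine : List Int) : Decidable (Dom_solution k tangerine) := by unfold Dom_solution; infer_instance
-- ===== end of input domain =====

-- B replaces A's descending sort of the Counter values by a count-indexed bucket counter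
-- scanned from the maximal count downwards (alternative algorithm, same results).

-- ===== PORT A =====
-- 'for i in frequent: total += i; answer += 1; if total >= k: break' then 'return answer'
def solALoop (k : Int) : List Int → Int → Int → Int
  | [], answer, _ => answer
  | i :: rest, answer, total =>
    if total + i ≥ k then answer + 1
    else solALoop k rest (answer + 1) (total + i)

def solution (k : Int) (tangerine : List Int) : Int :=
  let frequency := PySem.Dict.counter tangerine
  let frequent := PySem.List.sorted frequency.values (fun x => x) true
  solALoop k frequent 0 0

-- ===== PORT B =====
-- 'for _ in range(buckets[c]): total += c; answer += 1; if total >= k: return answer'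
-- result: (some a, _, _) = early return with value a; (none, answer, total) = loop finished
def solBInner (k c : Int) : Nat → Int → Int → Option Int × Int × Int
  | 0, answer, total => (none, answer, total)
  | Nat.succ n, answer, total =>
    if total + c ≥ k then (some (answer + 1), answer + 1, total + c)
    else solBInner k c n (answer + 1) (total + c)

-- 'for c in range(max_count, 0, -1): …'
def solBOuter (k : Int) (buckets : PySem.Dict Int Int) : List Int → Int → Int → Int
  | [], answer, _ => answer
  | c :: rest, answer, total =>
    match solBInner k c (buckets.getD c 0).toNat answer total with
    | (some a, _, _) => a
    | (none, a, t) => solBOuter k buckets rest a t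

def solution_alt (k : Int) (tangerine : List Int) : Int :=
  let frequency := PySem.Dict.counter tangerine
  if frequency.size = 0 then 0
  else
    let buckets := PySem.Dict.counter frequency.values
    -- max(frequency.values()): the values list is nonempty on this branch, so max? = some …
    let max_count := (PySem.List.max? frequency.values (fun x => x)).getD 0
    solBOuter k buckets (PySem.List.pyRange max_count 0 (-1)) 0 0

-- ===== PRECONDITION & SPEC =====
def Spec_solution (k : Int) (tangerine : List Int) (out : Int) : Prop := out = solution_alt k tangerine
instance (k : Int) (tangerine : List Int) (out : Int) : Decidable (Spec_solution k tangerine out) := by unfold Spec_solution; infer_instance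

-- ===== CLAIM (what is proved, stated in full; the proofs are below) =====
def Claim_equal_solution : Prop := ∀ (k : Int) (tangerine : List Int), Dom_solution k tangerine → Spec_solution k tangerine (solution k tangerine)

-- ===== LEMMAS AND PROOFS =====

-- running B's inner loop n times with value c is running A's loop over n copies of c
theorem solBInner_eq_solALoop (k c : Int) (n : Nat) (rest : List Int) (answer total : Int) :
    solALoop k (List.replicate n c ++ rest) answer total =
      (match solBInner k c n answer total with
       | (some a, _, _) => a
       | (none, a, t) => solALoop k rest a t) := by
  induction n generalizing answer total with
  | zero => simp [solBInner]
  | succ m ih =>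
    simp only [List.replicate_succ, List.cons_append, solALoop, solBInner]
    split_ifs with h
    · rfl
    · exact ih _ _

-- B's outer loop over cs is A's loop over the bucket-expanded list
theorem solBOuter_eq_solALoop (k : Int) (buckets : PySem.Dict Int Int) (cs : List Int)
    (answer total : Int) :
    solBOuter k buckets cs answer total =
      solALoop k (cs.flatMap (fun c => List.replicate (buckets.getD c 0).toNat c)) answer total := by
  induction cs generalizing answer total with
  | nil => rfl
  | cons c rest ih =>
    simp only [solBOuter, List.flatMap_cons]
    rw [solBInner_eq_solALoop]
    cases hsb : solBInner k c (buckets.getD c 0).toNat answer total with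
    | mk o p =>
      cases o with
      | some a => rfl
      | none => exact ih p.1 p.2

-- bucket expansion of a Nodup list covering every element of vals is a permutation of vals
theorem flatMap_replicate_count_perm (cs : List Int) : ∀ (vals : List Int), cs.Nodup →
    (∀ v ∈ vals, v ∈ cs) →
    (cs.flatMap (fun c => List.replicate (vals.count c) c)).Perm vals := by
  induction cs with
  | nil =>
    intro vals _ hmem
    cases vals with
    | nil => simp
    | cons v t => exact absurd (hmem v (by simp)) (by simp)
  | cons c rest ih =>
    intro vals hnd hmem
    have hcnot : c ∉ rest := (List.nodup_cons.mp hnd).1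
    have hnd' : rest.Nodup := (List.nodup_cons.mp hnd).2
    set vr := vals.filter (fun v => !(v == c)) with hvr
    have hcongr : rest.flatMap (fun c' => List.replicate (vals.count c') c') =
        rest.flatMap (fun c' => List.replicate (vr.count c') c') := by
      apply List.flatMap_congr
      intro c' hc'
      have hne : (c' == c) = false := by
        simp only [beq_eq_false_iff_ne, ne_eq]
        rintro rfl; exact hcnot hc'
      rw [hvr, List.count_filter (by simp [hne])]
    have hperm : (rest.flatMap (fun c' => List.replicate (vr.count c') c')).Perm vr := by
      apply ih vr hnd'
      intro v hv
      have hv' := List.mem_filter.mp hv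
      rcases List.mem_cons.mp (hmem v hv'.1) with h | h
      · exact absurd h (by simpa using hv'.2)
      · exact h
    have h1 : ((c :: rest).flatMap (fun c' => List.replicate (vals.count c') c')) =
        vals.filter (· == c) ++ rest.flatMap (fun c' => List.replicate (vr.count c') c') := by
      rw [List.flatMap_cons, hcongr, ← List.filter_beq]
    rw [h1]
    exact (hperm.append_left _).trans (List.filter_append_perm _ vals)

-- the bucket expansion of a strictly decreasing list is weakly decreasing
theorem pairwise_flatMap_replicate (cs : List Int) (n : Int → Nat)
    (h : cs.Pairwise (fun a b => b < a)) :
    (cs.flatMap (fun c => List.replicate (n c) c)).Pairwise (fun a b => b ≤ a) := by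
  induction cs with
  | nil => simp
  | cons c rest ih =>
    rw [List.flatMap_cons, List.pairwise_append]
    refine ⟨List.pairwise_replicate.mpr (Or.inr le_rfl), ih (List.pairwise_cons.mp h).2, ?_⟩
    intro a ha b hb
    rcases List.mem_flatMap.mp hb with ⟨c', hc', hb'⟩
    rw [List.eq_of_mem_replicate ha, List.eq_of_mem_replicate hb']
    exact le_of_lt ((List.pairwise_cons.mp h).1 c' hc')

-- two weakly decreasing Int lists that are permutations of each other are equal
theorem desc_sorted_unique (l₁ l₂ : List Int) (hp : l₁.Perm l₂)
    (h₁ : l₁.Pairwise (fun a b => b ≤ a)) (h₂ : l₂.Pairwise (fun a b => b ≤ a)) : l₁ = l₂ :=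
  PySem.List.eq_of_perm_of_pairwise_le_of_injective (fun x => -x) neg_injective hp
    (by simpa using h₁) (by simpa using h₂)

theorem solution_eq_alt (k : Int) (tangerine : List Int) :
    solution k tangerine = solution_alt k tangerine := by
  by_cases hnil : tangerine = []
  · subst hnil; rfl
  · obtain ⟨x, hx⟩ := List.exists_mem_of_ne_nil tangerine hnil
    have hx' : x ∈ PySem.Set.ofList tangerine := (PySem.Set.mem_ofList _ _).mpr hx
    set vals := (PySem.Dict.counter tangerine).values with hvalsdef
    have hvals_eq : vals = (PySem.Set.ofList tangerine).map (fun key => ((tangerine.count key : Int))) := by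
      simp [hvalsdef, PySem.Dict.values, PySem.Dict.items_counter, List.map_map, Function.comp]
    have hvals_ne : vals ≠ [] := by
      rw [hvals_eq]
      exact List.ne_nil_of_mem (List.mem_map.mpr ⟨x, hx', rfl⟩)
    have hpos : ∀ v ∈ vals, 1 ≤ v := by
      intro v hv
      rw [hvals_eq] at hv
      rcases List.mem_map.mp hv with ⟨key, hkey, rfl⟩
      have : 0 < tangerine.count key := List.count_pos_iff.mpr ((PySem.Set.mem_ofList _ _).mp hkey)
      omega
    obtain ⟨m, hm⟩ : ∃ m, PySem.List.max? vals (fun x => x) = some m := by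
      cases h : PySem.List.max? vals (fun x => x) with
      | none => exact absurd ((PySem.List.max?_eq_none_iff _ _).mp h) hvals_ne
      | some m => exact ⟨m, rfl⟩
    have hmax := PySem.List.max?_isMax hm
    have hcover : ∀ v ∈ vals, v ∈ PySem.List.pyRange m 0 (-1) := fun v hv =>
      PySem.List.mem_pyRange_neg_one.mpr ⟨by have := hpos v hv; omega, hmax v hv⟩
    have hndR : (PySem.List.pyRange m 0 (-1)).Nodup := by
      rw [PySem.List.pyRange_neg_one_eq_reverse]
      exact List.nodup_reverse.mpr (PySem.List.nodup_pyRange_one _ _)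
    have hdescR : (PySem.List.pyRange m 0 (-1)).Pairwise (fun a b => b < a) := by
      rw [PySem.List.pyRange_neg_one_eq_reverse]
      exact List.pairwise_reverse.mpr (PySem.List.pairwise_lt_pyRange_one _ _)
    have hkey : (PySem.List.pyRange m 0 (-1)).flatMap (fun c => List.replicate (vals.count c) c)
        = PySem.List.sorted vals (fun x => x) true :=
      desc_sorted_unique _ _
        ((flatMap_replicate_count_perm _ vals hndR hcover).trans
          (PySem.List.sorted_perm vals _ true).symm)
        (pairwise_flatMap_replicate _ _ hdescR)
        (PySem.List.sorted_pairwise_rev vals _)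
    have hsize : (PySem.Dict.counter tangerine).size ≠ 0 := by
      have : vals.length ≠ 0 := fun h => hvals_ne (List.eq_nil_of_length_eq_zero h)
      simpa [hvalsdef, PySem.Dict.values, PySem.Dict.size] using this
    simp only [solution, solution_alt, ← hvalsdef, if_neg hsize, hm, Option.getD_some]
    rw [solBOuter_eq_solALoop]
    simp only [PySem.Dict.getD_counter, Int.toNat_natCast]
    rw [hkey]

-- ===== VERDICT (by name: the statement is the Claim_ definition above) =====
theorem solution_spec : Claim_equal_solution := by
  intro k tangerine _
  unfold Spec_solution
  exact solution_eq_alt k tangerine
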